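-- pv_equiv track=rewrite | github.com/DancingOnAir/LeetcodePythonSolution | string/1653_minimum_deletions_to_make_string_balanced.py | minimumDeletions2
-- ===== SOURCE A (Python) =====
-- def minimumDeletions2(s: str) -> int:
--     cnt_a, cnt_b, res = s.count('a'), 0, len(s)
--     for c in s:
--         if c == 'b':
--             res = min(res, cnt_a + cnt_b)
--             cnt_b += 1
--         else:
--             cnt_a -= 1
--     return min(res, cnt_b)
-- ===== SOURCE B (Python) =====
-- def minimumDeletions2(s: str) -> int:
--     # Balanced = some 'b' is the first character kept from the b-side (or all b's
--     # are deleted).  Keeping the j-th 'b' (at index i) costs: delete the j b's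
--     # before it plus the a's after it, i.e. s.count('a') - (i - j) + j.
--     bs = [i for i, c in enumerate(s) if c == 'b']
--     if not bs:
--         return 0
--     return min(len(bs), s.count('a') + min(2 * j - i for j, i in enumerate(bs)))
-- ===== Notes on version B (the rewrite author's own statement) =====
-- stated objective: simpler
-- what changed: Replaces A's three-counter forward scan (decrementing a-count, running b-count, running min) with a staged computation: collect the b positions, then take a closed-form min over them of the per-position cost 2*j - i plus the total a-count.
import Mathlib
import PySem

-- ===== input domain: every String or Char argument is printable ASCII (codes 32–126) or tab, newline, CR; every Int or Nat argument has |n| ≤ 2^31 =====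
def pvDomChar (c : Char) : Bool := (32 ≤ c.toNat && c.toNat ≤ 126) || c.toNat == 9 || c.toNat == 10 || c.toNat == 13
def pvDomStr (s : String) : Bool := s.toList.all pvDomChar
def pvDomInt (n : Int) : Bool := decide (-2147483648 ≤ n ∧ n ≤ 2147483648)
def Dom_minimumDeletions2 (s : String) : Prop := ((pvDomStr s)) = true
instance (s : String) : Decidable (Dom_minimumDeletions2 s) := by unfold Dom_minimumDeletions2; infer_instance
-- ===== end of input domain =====

-- B replaces A's three-counter forward scan by a staged computation: collect the b
-- positions, then a closed-form min of the per-position cost over them. Same O(n) cost.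

-- ===== PORT A =====
-- state = (cnt_a, cnt_b, res)
def stepA (st : Int × Int × Int) (c : Char) : Int × Int × Int :=
  if c == 'b' then (st.1, st.2.1 + 1, min st.2.2 (st.1 + st.2.1))
  else (st.1 - 1, st.2.1, st.2.2)

def minimumDeletions2 (s : String) : Int :=
  let st := s.toList.foldl stepA (((PySem.Str.count s "a" : Nat) : Int), 0, PySem.Str.len s)
  min st.2.2 st.2.1

-- ===== PORT B =====
def minimumDeletions2_alt (s : String) : Int :=
  let bs : List Int :=
    ((PySem.List.enumerate s.toList).filter (fun p => p.2 == 'b')).map (fun p => p.1)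
  if bs.isEmpty then 0
  else
    let terms := (PySem.List.enumerate bs).map (fun p => 2 * p.1 - p.2)
    min (bs.length : Int)
      (((PySem.Str.count s "a" : Nat) : Int) + (PySem.List.min? terms (fun x => x)).getD 0)

-- ===== PRECONDITION & SPEC =====
def Spec_minimumDeletions2 (s : String) (out : Int) : Prop := out = minimumDeletions2_alt s
instance (s : String) (out : Int) : Decidable (Spec_minimumDeletions2 s out) := by unfold Spec_minimumDeletions2; infer_instance

-- ===== CLAIM (what is proved, stated in full; the proofs are below) =====
def Claim_equal_minimumDeletions2 : Prop := ∀ (s : String), Dom_minimumDeletions2 s → Spec_minimumDeletions2 s (minimumDeletions2 s)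

-- ===== LEMMAS AND PROOFS =====

/-- Int-valued count of 'b' in a char list. -/
def cntBI : List Char → Int
  | [] => 0
  | c :: t => (if c == 'b' then 1 else 0) + cntBI t

lemma cntBI_eq (l : List Char) : cntBI l = (l.count 'b' : Int) := by
  induction l with
  | nil => simp [cntBI]
  | cons c t ih =>
    by_cases hc : c = 'b' <;> simp [cntBI, hc, ih] <;> omega

lemma foldA_cb (l : List Char) (ca cb r : Int) :
    (l.foldl stepA (ca, cb, r)).2.1 = cb + cntBI l := by
  induction l generalizing ca cb r with
  | nil => simp [cntBI]
  | cons c t ih =>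
    cases hc : (c == 'b') <;>
      simp only [List.foldl_cons, stepA, hc, Bool.false_eq_true, if_false, if_true, cntBI, ih] <;>
      omega

/-- Split-cost terms of A's scan: one term `base + 2*b - i` per 'b', where `i` is the
    running index and `b` the running count of previous 'b's. -/
def termsA (i b base : Int) : List Char → List Int
  | [] => []
  | c :: t => if c == 'b' then (base + 2 * b - i) :: termsA (i + 1) (b + 1) base t
              else termsA (i + 1) b base t

lemma foldA_res (l : List Char) : ∀ (i b base ca cb r : Int), ca + cb = base + 2 * b - i →
    (l.foldl stepA (ca, cb, r)).2.2 = (termsA i b base l).foldl min r := by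
  induction l with
  | nil => intro i b base ca cb r h; simp [termsA]
  | cons c t ih =>
    intro i b base ca cb r h
    cases hc : (c == 'b')
    · simp only [List.foldl_cons, stepA, hc, Bool.false_eq_true, if_false, termsA]
      exact ih (i + 1) b base (ca - 1) cb r (by omega)
    · simp only [List.foldl_cons, stepA, hc, if_true, termsA, List.foldl_cons]
      rw [ih (i + 1) (b + 1) base ca (cb + 1) (min r (ca + cb)) (by omega), h]

/-- Positions (indices from `i`) of the 'b's of a char list. -/
def posB (i : Int) : List Char → List Int
  | [] => []
  | c :: t => if c == 'b' then i :: posB (i + 1) t else posB (i + 1) t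

lemma bs_eq (l : List Char) : ∀ (i : Int),
    ((PySem.List.enumerate l i).filter (fun p => p.2 == 'b')).map (fun p => p.1) = posB i l := by
  induction l with
  | nil => intro i; simp [PySem.List.enumerate_nil, posB]
  | cons c t ih =>
    intro i
    cases hc : (c == 'b') <;>
      simp [PySem.List.enumerate_cons, posB, hc, ih]

lemma posB_length (l : List Char) : ∀ (i : Int), ((posB i l).length : Int) = cntBI l := by
  induction l with
  | nil => intro i; simp [posB, cntBI]
  | cons c t ih =>
    intro i
    cases hc : (c == 'b') <;>
      simp only [posB, cntBI, hc, Bool.false_eq_true, if_false, if_true, List.length_cons] <;>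
      rw [← ih (i + 1)] <;> omega

/-- B's per-position terms `2*j - p` over the enumerated position list. -/
def mapTerms (j : Int) : List Int → List Int
  | [] => []
  | p :: t => (2 * j - p) :: mapTerms (j + 1) t

lemma terms_eq (ps : List Int) : ∀ (j : Int),
    (PySem.List.enumerate ps j).map (fun p => 2 * p.1 - p.2) = mapTerms j ps := by
  induction ps with
  | nil => intro j; simp [PySem.List.enumerate_nil, mapTerms]
  | cons p t ih => intro j; simp [PySem.List.enumerate_cons, mapTerms, ih]

lemma mapTerms_posB (l : List Char) : ∀ (i j : Int),
    mapTerms j (posB i l) = termsA i j 0 l := by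
  induction l with
  | nil => intro i j; simp [posB, termsA, mapTerms]
  | cons c t ih =>
    intro i j
    cases hc : (c == 'b') <;>
      simp only [posB, termsA, hc, Bool.false_eq_true, if_false, if_true, mapTerms, ih] <;>
      try rw [show (0 : Int) + 2 * j - i = 2 * j - i by ring]

lemma termsA_base (l : List Char) : ∀ (i b base : Int),
    termsA i b base l = (termsA i b 0 l).map (fun x => base + x) := by
  induction l with
  | nil => intro i b base; simp [termsA]
  | cons c t ih =>
    intro i b base
    cases hc : (c == 'b')
    · simp only [termsA, hc, Bool.false_eq_true, if_false]
      exact ih (i + 1) b base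
    · simp only [termsA, hc, if_true, List.map_cons, ih (i + 1) (b + 1) base]
      rw [show base + (0 + 2 * b - i) = base + 2 * b - i by ring]

lemma foldl_min_shift (l : List Int) : ∀ (a b : Int),
    l.foldl min (min a b) = min a (l.foldl min b) := by
  induction l with
  | nil => intro a b; simp
  | cons c t ih =>
    intro a b
    simp only [List.foldl_cons]
    rw [min_assoc, ih]

lemma foldl_min_map_add (l : List Int) : ∀ (K a : Int),
    (l.map (fun x => K + x)).foldl min (K + a) = K + l.foldl min a := by
  induction l with
  | nil => intro K a; simp
  | cons c t ih =>
    intro K a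
    simp only [List.map_cons, List.foldl_cons]
    rw [show min (K + a) (K + c) = K + min a c by omega, ih]

-- ===== VERDICT (by name: the statement is the Claim_ definition above) =====
theorem minimumDeletions2_spec : Claim_equal_minimumDeletions2 := by
  intro s _
  show minimumDeletions2 s = minimumDeletions2_alt s
  simp only [minimumDeletions2, minimumDeletions2_alt]
  set l := s.toList with hl
  set K : Int := ((PySem.Str.count s "a" : Nat) : Int) with hK
  have hn : PySem.Str.len s = (l.length : Int) := by simp [PySem.Str.len, hl]
  have hres : (l.foldl stepA (K, 0, PySem.Str.len s)).2.2 =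
      (termsA 0 0 K l).foldl min (l.length : Int) := by
    rw [hn]; exact foldA_res l 0 0 K K 0 _ (by ring)
  have hcb : (l.foldl stepA (K, 0, PySem.Str.len s)).2.1 = cntBI l := by
    rw [foldA_cb]; ring
  rw [hres, hcb, bs_eq, terms_eq, mapTerms_posB, termsA_base]
  have hlen : ((posB 0 l).length : Int) = cntBI l := posB_length l 0
  have hb_le : cntBI l ≤ (l.length : Int) := by
    rw [cntBI_eq]; exact_mod_cast List.count_le_length
  have hlen_nonneg : (0 : Int) ≤ (l.length : Int) := by positivity
  cases hts : termsA 0 0 0 l with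
  | nil =>
    have hbs : posB 0 l = [] := by
      cases hps : posB 0 l with
      | nil => rfl
      | cons p t => rw [← mapTerms_posB l 0 0, hps] at hts; simp [mapTerms] at hts
    rw [hbs] at hlen
    simp only [List.length_nil, Nat.cast_zero] at hlen
    simp only [hbs, List.map_nil, List.foldl_nil, List.isEmpty_nil, if_true]
    omega
  | cons x t =>
    have hbs : (posB 0 l).isEmpty = false := by
      cases hps : posB 0 l with
      | nil => rw [← mapTerms_posB l 0 0, hps] at hts; simp [mapTerms] at hts
      | cons p u => simp
    simp only [hbs, Bool.false_eq_true, if_false]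
    rw [PySem.List.min?_id_cons, Option.getD_some]
    simp only [List.map_cons, List.foldl_cons]
    rw [foldl_min_shift, foldl_min_map_add]
    omega
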